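-- pv_equiv track=rewrite | github.com/rbleattler/PKMDS-Blazor | tools/generate-descriptions.py | field_epochs
-- ===== SOURCE A (Python) =====
-- def field_epochs(field_changes: list[tuple[int, str]], current_val: str) -> list[tuple[int, str]]:
--     """
--     Given a list of (version_group_id, old_value) pairs sorted ascending, and the
--     current value from moves.csv, return a list of (from_vg, value) epochs.
--
--     See module docstring for the changelog interpretation.
--     """
--     if not field_changes:
--         return [(1, current_val)]
--
--     epochs: list[tuple[int, str]] = []
--     for i, (vg, val) in enumerate(field_changes):
--         from_vg = field_changes[i - 1][0] if i > 0 else 1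
--         epochs.append((from_vg, val))
--     # Final epoch: from the last changelog VG onward, use the current value
--     epochs.append((field_changes[-1][0], current_val))
--     return epochs
-- ===== SOURCE B (Python) =====
-- def field_epochs(field_changes: list[tuple[int, str]], current_val: str) -> list[tuple[int, str]]:
--     out: list[tuple[int, str]] = []
--     val = current_val
--     for vg, old in reversed(field_changes):
--         out.append((vg, val))
--         val = old
--     out.append((1, val))
--     out.reverse()
--     return out
-- ===== Notes on version B (the rewrite author's own statement) =====
-- stated objective: alternative
-- what changed: Builds the epoch list back-to-front: walks the reversed changelog carrying the following epoch's value (starting from current_val), pairs each version-group with it, appends the initial (1, val) epoch and reverses - no enumerate, no field_changes[i-1]/[-1] indexing and no empty-list early return.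
import Mathlib
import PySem

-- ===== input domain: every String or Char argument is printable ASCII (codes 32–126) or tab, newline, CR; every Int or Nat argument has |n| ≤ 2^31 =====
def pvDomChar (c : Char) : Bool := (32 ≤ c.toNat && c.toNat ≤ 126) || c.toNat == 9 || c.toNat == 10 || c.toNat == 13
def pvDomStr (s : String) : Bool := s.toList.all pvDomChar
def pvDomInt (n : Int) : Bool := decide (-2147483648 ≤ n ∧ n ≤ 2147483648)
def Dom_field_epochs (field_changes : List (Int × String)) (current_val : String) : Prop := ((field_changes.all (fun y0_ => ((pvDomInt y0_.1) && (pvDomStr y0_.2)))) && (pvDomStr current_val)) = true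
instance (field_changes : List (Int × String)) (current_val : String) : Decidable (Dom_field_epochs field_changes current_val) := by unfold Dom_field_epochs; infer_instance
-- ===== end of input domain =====

-- B builds the epoch list back-to-front: it walks the reversed changelog carrying the following
-- epoch's value, then appends the initial epoch and reverses; objective: alternative.

-- ===== PORT A =====
-- literal port of A: early return on [], then a loop over enumerate appending
-- (field_changes[i-1][0] if i > 0 else 1, val), then append (field_changes[-1][0], current_val)
def field_epochs (field_changes : List (Int × String)) (current_val : String) : List (Int × String) :=
  if field_changes = [] then [(1, current_val)]
  else
    let epochs : List (Int × String) :=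
      (PySem.List.enumerate field_changes).foldl
        (fun acc p =>
          let i := p.1
          let val := p.2.2
          let from_vg : Int :=
            if i > 0 then ((PySem.List.pyGet? field_changes (i - 1)).getD (0, "")).1 else 1
          acc ++ [(from_vg, val)]) []
    epochs ++ [(((PySem.List.pyGet? field_changes (-1)).getD (0, "")).1, current_val)]

-- ===== PORT B =====
-- port of B: loop over reversed(field_changes) with state (out, val), then append (1, val), reverse
def field_epochs_alt (field_changes : List (Int × String)) (current_val : String) : List (Int × String) :=
  let s := field_changes.reverse.foldl
    (fun (st : List (Int × String) × String) p => (st.1 ++ [(p.1, st.2)], p.2))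
    ([], current_val)
  (s.1 ++ [(1, s.2)]).reverse

-- ===== PRECONDITION & SPEC =====
def Spec_field_epochs (field_changes : List (Int × String)) (current_val : String) (out : List (Int × String)) : Prop := out = field_epochs_alt field_changes current_val
instance (field_changes : List (Int × String)) (current_val : String) (out : List (Int × String)) : Decidable (Spec_field_epochs field_changes current_val out) := by unfold Spec_field_epochs; infer_instance

-- ===== CLAIM (what is proved, stated in full; the proofs are below) =====
def Claim_equal_field_epochs : Prop := ∀ (field_changes : List (Int × String)) (current_val : String), Dom_field_epochs field_changes current_val → Spec_field_epochs field_changes current_val (field_epochs field_changes current_val)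

-- ===== LEMMAS AND PROOFS =====

-- B's reversed fold characterised as a zip of the shifted key list with the value list
-- (stated for an arbitrary initial key p; B uses p = 1)
theorem revFold_eq_zip (cv : String) (fc : List (Int × String)) (p : Int) :
    (((fc.reverse.foldl
        (fun (st : List (Int × String) × String) q => (st.1 ++ [(q.1, st.2)], q.2))
        ([], cv)).1 ++
      [(p, (fc.reverse.foldl
        (fun (st : List (Int × String) × String) q => (st.1 ++ [(q.1, st.2)], q.2))
        ([], cv)).2)]).reverse)
      = List.zip (p :: fc.map Prod.fst) (fc.map Prod.snd ++ [cv]) := by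
  induction fc generalizing p with
  | nil => simp
  | cons hd tl ih =>
    cases hd with
    | mk vg val =>
      simp only [List.reverse_cons, List.foldl_append, List.foldl_cons, List.foldl_nil,
        List.map_cons, List.zip_cons_cons, List.cons_append]
      rw [List.reverse_append]
      simpa using congrArg (List.cons (p, val)) (ih vg)

-- fc[-1] on a nonempty list is its last element
theorem pyGet_neg_one (fc : List (Int × String)) (h : fc ≠ []) :
    PySem.List.pyGet? fc (-1) = fc[fc.length - 1]? := by
  have hl : 0 < fc.length := List.length_pos_iff.mpr h
  simp only [PySem.List.pyGet?, PySem.List.pyIdx?]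
  have h1 : ¬ ((0:Int) ≤ -1) := by omega
  have h3 : (-(fc.length:Int) ≤ -1) := by omega
  rw [if_neg h1, if_pos h3]
  norm_num

-- A's result also equals that zip (proved by index, via List.ext_getElem)
theorem field_epochs_eq_zip (fc : List (Int × String)) (cv : String) :
    field_epochs fc cv = List.zip (1 :: fc.map Prod.fst) (fc.map Prod.snd ++ [cv]) := by
  unfold field_epochs
  by_cases h : fc = []
  · subst h; simp
  · simp only [if_neg h]
    rw [PySem.List.foldl_append_singleton_eq_map]
    simp only [List.nil_append]
    have hl : 0 < fc.length := List.length_pos_iff.mpr h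
    apply List.ext_getElem
    · simp [PySem.List.length_enumerate]
    · intro k h1 h2
      have hk : k < fc.length + 1 := by
        simpa [PySem.List.length_enumerate] using h1
      rw [List.getElem_zip]
      by_cases hkn : k < fc.length
      · rw [List.getElem_append_left (by simp [PySem.List.length_enumerate]; omega)]
        rw [List.getElem_map, PySem.List.getElem_enumerate]
        by_cases hk0 : k = 0
        · subst hk0
          simp [List.getElem_append_left, List.getElem_cons_zero, hkn]
        · have hkp : 0 < k := Nat.pos_of_ne_zero hk0
          have hi : (0:Int) < (k:Int) := by exact_mod_cast hkp
          simp only [zero_add]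
          rw [if_pos hi]
          have hcast : (k:Int) - 1 = ((k-1 : Nat) : Int) := by omega
          rw [hcast, PySem.List.pyGet?_natCast]
          have hlt : k - 1 < fc.length := by omega
          rw [List.getElem?_eq_getElem hlt]
          simp only [Option.getD_some]
          rw [List.getElem_cons, List.getElem_append_left (by simpa using hkn)]
          simp [hk0, List.getElem_map]
      · have hke : k = fc.length := by omega
        subst hke
        have hlast : fc.length - 1 < fc.length := by omega
        rw [List.getElem_append_right (by simp [PySem.List.length_enumerate])]
        simp only [pyGet_neg_one fc h, List.getElem?_eq_getElem hlast, Option.getD_some,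
          PySem.List.length_enumerate, List.length_map]
        rw [List.getElem_cons, List.getElem_append_right (by simp)]
        have hne : fc.length ≠ 0 := by omega
        simp [hne, List.getElem_cons, List.getElem_map]

-- ===== VERDICT (by name: the statement is the Claim_ definition above) =====
theorem field_epochs_spec : Claim_equal_field_epochs := by
  intro fc cv _
  show field_epochs fc cv = field_epochs_alt fc cv
  rw [field_epochs_eq_zip, field_epochs_alt]
  exact (revFold_eq_zip cv fc 1).symm
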